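-- pv_equiv track=rewrite | github.com/Nquan0207/2D-and-3D-render | utils/meshio.py | _triangles_from_strips
-- ===== SOURCE A (Python) =====
-- def _triangles_from_strips(strip_indices: list[int]) -> list[tuple[int, int, int]]:
--     tris: list[tuple[int, int, int]] = []
--     window: list[int] = []
--     flip = False
--     for idx in strip_indices:
--         if idx < 0:
--             window.clear()
--             flip = False
--             continue
--         window.append(idx)
--         if len(window) < 3:
--             continue
--         a, b, c = window[-3], window[-2], window[-1]
--         if flip:
--             tri = (b, a, c)
--         else:
--             tri = (a, b, c)
--         flip = not flip
--         if tri[0] == tri[1] or tri[1] == tri[2] or tri[0] == tri[2]: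
--             continue
--         tris.append(tri)
--     return tris
-- ===== SOURCE B (Python) =====
-- def _triangles_from_strips(strip_indices: list[int]) -> list[tuple[int, int, int]]:
--     # Split into runs of non-negative indices, then index each run positionally.
--     runs: list[list[int]] = []
--     cur: list[int] = []
--     for idx in strip_indices:
--         if idx < 0:
--             if cur:
--                 runs.append(cur)
--                 cur = []
--         else:
--             cur.append(idx)
--     if cur:
--         runs.append(cur)
--     tris: list[tuple[int, int, int]] = []
--     for seg in runs:
--         for i in range(len(seg) - 2):
--             a, b, c = seg[i], seg[i + 1], seg[i + 2]
--             tri = (b, a, c) if i % 2 else (a, b, c)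
--             if a != b and b != c and a != c:
--                 tris.append(tri)
--     return tris
-- ===== Notes on version B (the rewrite author's own statement) =====
-- stated objective: alternative
-- what changed: Replaces the sliding window with a mutable flip flag by a two-phase decomposition: first split the strip into runs of non-negative indices, then emit each run's triangles by positional indexing with i % 2 parity.
import Mathlib
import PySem

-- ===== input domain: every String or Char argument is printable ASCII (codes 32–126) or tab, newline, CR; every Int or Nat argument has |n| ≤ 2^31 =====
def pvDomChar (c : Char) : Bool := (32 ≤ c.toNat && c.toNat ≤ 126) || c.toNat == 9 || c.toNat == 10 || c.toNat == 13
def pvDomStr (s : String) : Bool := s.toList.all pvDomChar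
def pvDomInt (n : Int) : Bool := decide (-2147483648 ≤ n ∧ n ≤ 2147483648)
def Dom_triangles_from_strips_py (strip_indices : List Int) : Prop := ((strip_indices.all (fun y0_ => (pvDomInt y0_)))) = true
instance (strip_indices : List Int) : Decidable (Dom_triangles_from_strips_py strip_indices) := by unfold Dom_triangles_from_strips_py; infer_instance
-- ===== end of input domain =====

-- B replaces A's sliding window + mutable flip flag by run-splitting followed by
-- positional indexing with i % 2 parity (objective: alternative decomposition, same cost).


-- ===== PORT A =====
-- one iteration of A's loop; state = (tris, window, flip)
def pvStepA (s : List (Int × Int × Int) × List Int × Bool) (idx : Int) :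
    List (Int × Int × Int) × List Int × Bool :=
  if idx < 0 then (s.1, [], false)
  else
    let w := s.2.1 ++ [idx]
    if w.length < 3 then (s.1, w, s.2.2)
    else
      -- window[-3], window[-2], window[-1]; in range since len(window) ≥ 3
      let a := PySem.List.pyGetD w (-3) 0
      let b := PySem.List.pyGetD w (-2) 0
      let c := PySem.List.pyGetD w (-1) 0
      let tri := if s.2.2 then (b, a, c) else (a, b, c)
      if tri.1 = tri.2.1 ∨ tri.2.1 = tri.2.2 ∨ tri.1 = tri.2.2 then (s.1, w, !s.2.2)
      else (s.1 ++ [tri], w, !s.2.2)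

def triangles_from_strips_py (strip_indices : List Int) : List (Int × Int × Int) :=
  (strip_indices.foldl pvStepA ([], [], false)).1

-- ===== PORT B =====
-- run builder: state = (finished runs, current run)
def pvStepRun (s : List (List Int) × List Int) (idx : Int) : List (List Int) × List Int :=
  if idx < 0 then (if s.2 = [] then s else (s.1 ++ [s.2], [])) else (s.1, s.2 ++ [idx])

-- inner loop body: i-th candidate triangle of a run seg (seg[i] is in range for i < len-2)
def pvStepTri (seg : List Int) (acc : List (Int × Int × Int)) (i : Nat) :
    List (Int × Int × Int) :=
  let a := seg.getD i 0
  let b := seg.getD (i + 1) 0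
  let c := seg.getD (i + 2) 0
  let tri := if i % 2 = 1 then (b, a, c) else (a, b, c)
  if a ≠ b ∧ b ≠ c ∧ a ≠ c then acc ++ [tri] else acc

def triangles_from_strips_py_alt (strip_indices : List Int) : List (Int × Int × Int) :=
  let p := strip_indices.foldl pvStepRun ([], [])
  let runs := if p.2 = [] then p.1 else p.1 ++ [p.2]
  runs.foldl (fun acc seg => (List.range (seg.length - 2)).foldl (pvStepTri seg) acc) []

-- ===== PRECONDITION & SPEC =====
def Spec_triangles_from_strips_py (strip_indices : List Int) (out : List (Int × Int × Int)) : Prop := out = triangles_from_strips_py_alt strip_indices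
instance (strip_indices : List Int) (out : List (Int × Int × Int)) : Decidable (Spec_triangles_from_strips_py strip_indices out) := by unfold Spec_triangles_from_strips_py; infer_instance

-- ===== CLAIM (what is proved, stated in full; the proofs are below) =====
def Claim_equal_triangles_from_strips_py : Prop := ∀ (strip_indices : List Int), Dom_triangles_from_strips_py strip_indices → Spec_triangles_from_strips_py strip_indices (triangles_from_strips_py strip_indices)

-- ===== LEMMAS AND PROOFS =====

-- the i-th candidate of a run, as an Option (matches pvStepTri's append)
def pvEmitAt (seg : List Int) (i : Nat) : Option (Int × Int × Int) :=
  let a := seg.getD i 0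
  let b := seg.getD (i + 1) 0
  let c := seg.getD (i + 2) 0
  if a ≠ b ∧ b ≠ c ∧ a ≠ c then some (if i % 2 = 1 then (b, a, c) else (a, b, c)) else none

def pvSegTris (seg : List Int) : List (Int × Int × Int) :=
  (List.range (seg.length - 2)).filterMap (pvEmitAt seg)

-- triangle contributed when x is appended to the current run cur
def pvNewTris (cur : List Int) (x : Int) : List (Int × Int × Int) :=
  if cur.length < 2 then [] else (pvEmitAt (cur ++ [x]) (cur.length - 2)).toList

-- recursive characterisation of B's run builder
def pvRunsRec (cur : List Int) (xs : List Int) : List (List Int) :=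
  match xs with
  | [] => if cur = [] then [] else [cur]
  | x :: r =>
    if x < 0 then (if cur = [] then pvRunsRec [] r else cur :: pvRunsRec [] r)
    else pvRunsRec (cur ++ [x]) r

-- triangles of the continuation of the strip, given the current (non-negative) run cur
def pvContTris (cur : List Int) (xs : List Int) : List (Int × Int × Int) :=
  match xs with
  | [] => []
  | x :: r => if x < 0 then pvContTris [] r else pvNewTris cur x ++ pvContTris (cur ++ [x]) r

-- A's flip flag as a function of the current run length
def pvFlipOf (cur : List Int) : Bool := decide ((cur.length - 2) % 2 = 1)

lemma pvFold_stepTri (seg : List Int) :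
    ∀ (l : List Nat) (acc : List (Int × Int × Int)),
      l.foldl (pvStepTri seg) acc = acc ++ l.filterMap (pvEmitAt seg) := by
  intro l
  induction l with
  | nil => simp
  | cons i t ih =>
    intro acc
    rw [List.foldl_cons, ih]
    have hstep : pvStepTri seg acc i = acc ++ (pvEmitAt seg i).toList := by
      simp only [pvStepTri, pvEmitAt]
      split_ifs <;> simp
    rw [hstep, List.append_assoc]
    congr 1
    cases h : pvEmitAt seg i <;> simp [h]

lemma pvFold_runs (xs : List Int) :
    ∀ (rs : List (List Int)) (cur : List Int),
      (let p := xs.foldl pvStepRun (rs, cur)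
       if p.2 = [] then p.1 else p.1 ++ [p.2]) = rs ++ pvRunsRec cur xs := by
  induction xs with
  | nil => intro rs cur; simp only [List.foldl_nil, pvRunsRec]; split <;> simp_all
  | cons x r ih =>
    intro rs cur
    simp only [List.foldl_cons, pvRunsRec, pvStepRun]
    by_cases hx : x < 0
    · simp only [hx, if_pos]
      by_cases hc : cur = []
      · simp [hc, ih]
      · simp [hc, ih, List.append_assoc]
    · simp [hx, ih]

lemma pvSegTris_snoc (cur : List Int) (x : Int) :
    pvSegTris (cur ++ [x]) = pvSegTris cur ++ pvNewTris cur x := by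
  unfold pvSegTris pvNewTris
  rcases Nat.lt_or_ge cur.length 2 with h | h
  · interval_cases hl : cur.length <;>
      simp_all [List.length_append, Nat.sub_eq_zero_of_le]
  · have hlen : (cur ++ [x]).length - 2 = (cur.length - 2) + 1 := by
      simp [List.length_append]; omega
    rw [hlen, List.range_succ, List.filterMap_append]
    have hsame : ∀ i ∈ List.range (cur.length - 2), pvEmitAt (cur ++ [x]) i = pvEmitAt cur i := by
      intro i hi
      rw [List.mem_range] at hi
      unfold pvEmitAt
      rw [List.getD_append _ _ _ _ (by omega), List.getD_append _ _ _ _ (by omega),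
          List.getD_append _ _ _ _ (by omega)]
    rw [List.filterMap_congr hsame]
    cases hE : pvEmitAt (cur ++ [x]) (cur.length - 2) <;> simp [hE, Nat.not_lt.mpr h]

lemma pvContTris_eq (xs : List Int) :
    ∀ cur, pvSegTris cur ++ pvContTris cur xs = (pvRunsRec cur xs).flatMap pvSegTris := by
  induction xs with
  | nil =>
    intro cur
    simp only [pvContTris, pvRunsRec]
    split <;> simp_all [pvSegTris]
  | cons x r ih =>
    intro cur
    simp only [pvContTris, pvRunsRec]
    by_cases hx : x < 0
    · simp only [hx, if_pos]
      by_cases hc : cur = []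
      · simpa [hc, pvSegTris] using ih []
      · have := ih []
        simp [hc, List.flatMap_cons, ← this, pvSegTris]
    · rw [if_neg hx, if_neg hx, ← ih (cur ++ [x]), pvSegTris_snoc, List.append_assoc]

lemma pvFlipOf_short (cur : List Int) (h : cur.length < 2) (x : Int) :
    pvFlipOf (cur ++ [x]) = pvFlipOf cur := by
  unfold pvFlipOf
  simp only [List.length_append, List.length_cons, List.length_nil]
  interval_cases hl : cur.length <;> simp

lemma pvFlipOf_long (cur : List Int) (h : 2 ≤ cur.length) (x : Int) :
    pvFlipOf (cur ++ [x]) = !pvFlipOf cur := by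
  unfold pvFlipOf
  simp only [List.length_append, List.length_cons, List.length_nil]
  rcases Nat.even_or_odd (cur.length - 2) with he | ho
  · have h1 : (cur.length - 2) % 2 = 0 := Nat.even_iff.mp he
    have h2' : (cur.length - 1) % 2 = 1 := by omega
    simp [h1, h2']
  · have h1 : (cur.length - 2) % 2 = 1 := Nat.odd_iff.mp ho
    have h2' : (cur.length - 1) % 2 = 0 := by omega
    simp [h1, h2']

lemma pvFoldA (xs : List Int) :
    ∀ (acc : List (Int × Int × Int)) (cur : List Int),
      (xs.foldl pvStepA (acc, cur, pvFlipOf cur)).1 = acc ++ pvContTris cur xs := by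
  induction xs with
  | nil => intro acc cur; simp [pvContTris]
  | cons x r ih =>
    intro acc cur
    simp only [List.foldl_cons, pvContTris]
    by_cases hx : x < 0
    · have hflip : (false : Bool) = pvFlipOf [] := by simp [pvFlipOf]
      simp only [pvStepA, hx, if_pos, hflip, ih]
    · rw [if_neg hx]
      rcases Nat.lt_or_ge cur.length 2 with h | h
      · have hw : (cur ++ [x]).length < 3 := by simp only [List.length_append, List.length_cons, List.length_nil]; omega
        have hnew : pvNewTris cur x = [] := by simp [pvNewTris, h]
        have hstep : pvStepA (acc, cur, pvFlipOf cur) x = (acc, cur ++ [x], pvFlipOf (cur ++ [x])) := by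
          simp only [pvStepA]
          rw [if_neg hx, if_pos hw, pvFlipOf_short cur h x]
        rw [hstep, ih, hnew, List.nil_append]
      · have hw : ¬ (cur ++ [x]).length < 3 := by simp only [List.length_append, List.length_cons, List.length_nil]; omega
        have hga : PySem.List.pyGetD (cur ++ [x]) (-3) 0 = (cur ++ [x])[cur.length - 2 + 0]'(by simp only [List.length_append, List.length_cons, List.length_nil]; omega) := by
          rw [PySem.List.pyGetD_neg_ofNat (cur ++ [x]) 3 0 (by omega) (by simp only [List.length_append, List.length_cons, List.length_nil]; omega)]
          congr 1; simp only [List.length_append, List.length_cons, List.length_nil]; omega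
        have hgb : PySem.List.pyGetD (cur ++ [x]) (-2) 0 = (cur ++ [x])[cur.length - 2 + 1]'(by simp only [List.length_append, List.length_cons, List.length_nil]; omega) := by
          rw [PySem.List.pyGetD_neg_ofNat (cur ++ [x]) 2 0 (by omega) (by simp only [List.length_append, List.length_cons, List.length_nil]; omega)]
          congr 1; simp only [List.length_append, List.length_cons, List.length_nil]; omega
        have hgc : PySem.List.pyGetD (cur ++ [x]) (-1) 0 = (cur ++ [x])[cur.length - 2 + 2]'(by simp only [List.length_append, List.length_cons, List.length_nil]; omega) := by
          rw [PySem.List.pyGetD_neg_ofNat (cur ++ [x]) 1 0 (by omega) (by simp only [List.length_append, List.length_cons, List.length_nil]; omega)]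
          congr 1; simp only [List.length_append, List.length_cons, List.length_nil]; omega
        have hdb : (cur ++ [x]).getD (cur.length - 2 + 1) 0 = (cur ++ [x])[cur.length - 2 + 1]'(by simp only [List.length_append, List.length_cons, List.length_nil]; omega) :=
          List.getD_eq_getElem _ _ (by simp only [List.length_append, List.length_cons, List.length_nil]; omega)
        have hdc : (cur ++ [x]).getD (cur.length - 2 + 2) 0 = (cur ++ [x])[cur.length - 2 + 2]'(by simp only [List.length_append, List.length_cons, List.length_nil]; omega) :=
          List.getD_eq_getElem _ _ (by simp only [List.length_append, List.length_cons, List.length_nil]; omega)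
        set a := (cur ++ [x])[cur.length - 2 + 0]'(by simp only [List.length_append, List.length_cons, List.length_nil]; omega) with ha
        set b := (cur ++ [x])[cur.length - 2 + 1]'(by simp only [List.length_append, List.length_cons, List.length_nil]; omega) with hb
        set c := (cur ++ [x])[cur.length - 2 + 2]'(by simp only [List.length_append, List.length_cons, List.length_nil]; omega) with hc
        have hnew : pvNewTris cur x =
            (if a ≠ b ∧ b ≠ c ∧ a ≠ c then
              [if (cur.length - 2) % 2 = 1 then (b, a, c) else (a, b, c)] else []) := by
          unfold pvNewTris pvEmitAt
          simp only [Nat.not_lt.mpr h, hdb, hdc]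
          split_ifs <;> simp_all
        have hstep : pvStepA (acc, cur, pvFlipOf cur) x
            = (acc ++ pvNewTris cur x, cur ++ [x], pvFlipOf (cur ++ [x])) := by
          simp only [pvStepA]
          rw [if_neg hx, if_neg hw, hga, hgb, hgc, hnew, pvFlipOf_long cur h x]
          by_cases hp : (cur.length - 2) % 2 = 1
          · have hf : pvFlipOf cur = true := by simp [pvFlipOf, hp]
            rw [hf, if_pos rfl]
            by_cases hd : b = a ∨ a = c ∨ b = c
            · rw [if_pos hd, if_neg (show ¬ (a ≠ b ∧ b ≠ c ∧ a ≠ c) by tauto)]; simp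
            · rw [if_neg hd, if_pos (show a ≠ b ∧ b ≠ c ∧ a ≠ c by tauto), if_pos hp]
          · have hf : pvFlipOf cur = false := by simp [pvFlipOf, hp]
            rw [hf]
            simp only [Bool.false_eq_true, if_false]
            by_cases hd : a = b ∨ b = c ∨ a = c
            · rw [if_pos hd, if_neg (show ¬ (a ≠ b ∧ b ≠ c ∧ a ≠ c) by tauto)]; simp
            · rw [if_neg hd, if_pos (show a ≠ b ∧ b ≠ c ∧ a ≠ c by tauto), if_neg hp]
        rw [hstep, ih, List.append_assoc]

lemma pvAlt_eq (xs : List Int) : triangles_from_strips_py_alt xs = pvContTris [] xs := by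
  unfold triangles_from_strips_py_alt
  have h1 := pvFold_runs xs [] []
  simp only at h1
  have h2 : ∀ (runs : List (List Int)) (acc : List (Int × Int × Int)),
      runs.foldl (fun acc seg => (List.range (seg.length - 2)).foldl (pvStepTri seg) acc) acc
        = acc ++ runs.flatMap pvSegTris := by
    intro runs
    induction runs with
    | nil => simp
    | cons s t ih =>
      intro acc
      rw [List.foldl_cons, pvFold_stepTri, ih, List.append_assoc]
      rfl
  simp only [h1, List.nil_append, h2, List.nil_append]
  have := pvContTris_eq xs []
  simpa [pvSegTris] using this.symm

-- ===== VERDICT (by name: the statement is the Claim_ definition above) =====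
theorem triangles_from_strips_py_spec : Claim_equal_triangles_from_strips_py := by
  intro xs _
  unfold Spec_triangles_from_strips_py triangles_from_strips_py
  have hflip : (false : Bool) = pvFlipOf [] := by simp [pvFlipOf]
  rw [pvAlt_eq, hflip, pvFoldA xs [] []]
  simp
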